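-- pv_equiv track=rewrite | github.com/tituszban/advent_of_code_2025 | 02/2/main.py | _to_equal_length_ranges
-- ===== SOURCE A (Python) =====
-- def _to_equal_length_ranges(start: str, end: str):
--     if len(start) == len(end):
--         return [(start, end)]
--     ranges = []
--     _start = start
--     for length in range(len(start), len(end) + 1):
--         if length == len(end):
--             ranges.append((_start, end))
--         else:
--             ranges.append(
--                 (_start, (length) * "9")
--             )
--             _start = "1" + (length) * "0"
--     return ranges
-- ===== SOURCE B (Python) =====
-- def _to_equal_length_ranges(start: str, end: str):
--     # Recursive decomposition: peel off the shortest-length block and recurse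
--     # from the smallest number of the next digit length.
--     if len(start) >= len(end):
--         return [(start, end)] if len(start) == len(end) else []
--     return [(start, "9" * len(start))] + _to_equal_length_ranges("1" + "0" * len(start), end)
-- ===== Notes on version B (the rewrite author's own statement) =====
-- stated objective: alternative
-- what changed: Replaces A's iterative loop over digit lengths threading a `_start` accumulator (with an equal-length early return) with a recursion on the number itself: peel off the block ending at 9...9 of start's length and recurse from 10...0 of the next length; the base case handles both the equal-length and the empty (start longer than end) results.
import Mathlib
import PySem

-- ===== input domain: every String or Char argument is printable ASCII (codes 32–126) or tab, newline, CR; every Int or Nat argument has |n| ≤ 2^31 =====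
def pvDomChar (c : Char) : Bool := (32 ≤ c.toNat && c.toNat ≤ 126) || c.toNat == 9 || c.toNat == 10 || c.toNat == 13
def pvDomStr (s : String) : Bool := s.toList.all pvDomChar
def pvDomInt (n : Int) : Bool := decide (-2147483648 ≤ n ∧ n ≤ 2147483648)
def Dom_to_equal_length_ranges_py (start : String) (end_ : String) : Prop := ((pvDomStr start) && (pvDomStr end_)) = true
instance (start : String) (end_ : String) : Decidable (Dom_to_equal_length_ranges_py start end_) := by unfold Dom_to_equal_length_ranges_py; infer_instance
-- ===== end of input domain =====

-- B replaces A's iterative loop threading a running `_start` accumulator with a recursion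
-- that peels off one digit-length block and recurses from the next power of ten: alternative.

-- ===== PORT A =====
-- '"9" * length' / '"1" + "0" * length' are ported via PySem.List.pyRepeat on the char list
-- (exact for str * int), wrapped back with String.ofList.
def to_equal_length_ranges_py (start : String) (end_ : String) : List (String × String) :=
  if PySem.Str.len start = PySem.Str.len end_ then [(start, end_)]
  else
    ((PySem.List.pyRange (PySem.Str.len start) (PySem.Str.len end_ + 1) 1).foldl
      (fun (st : List (String × String) × String) length =>
        if length = PySem.Str.len end_ then (st.1 ++ [(st.2, end_)], st.2)
        else (st.1 ++ [(st.2, String.ofList (PySem.List.pyRepeat ['9'] length))],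
              String.ofList ('1' :: PySem.List.pyRepeat ['0'] length)))
      ([], start)).1

-- ===== PORT B =====
-- cited by B's termination proof: the recursive call's start is one char longer
lemma pv_len_next (s : String) :
    PySem.Str.len (String.ofList ('1' :: PySem.List.pyRepeat ['0'] (PySem.Str.len s)))
      = PySem.Str.len s + 1 := by
  simp [PySem.List.pyRepeat_singleton]

def to_equal_length_ranges_py_alt (start : String) (end_ : String) : List (String × String) :=
  if _h : PySem.Str.len end_ ≤ PySem.Str.len start then
    if PySem.Str.len start = PySem.Str.len end_ then [(start, end_)] else []
  else
    (start, String.ofList (PySem.List.pyRepeat ['9'] (PySem.Str.len start))) ::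
      to_equal_length_ranges_py_alt
        (String.ofList ('1' :: PySem.List.pyRepeat ['0'] (PySem.Str.len start))) end_
termination_by (PySem.Str.len end_ - PySem.Str.len start).toNat
decreasing_by
  rw [pv_len_next]
  omega

-- ===== PRECONDITION & SPEC =====
def Spec_to_equal_length_ranges_py (start : String) (end_ : String) (out : List (String × String)) : Prop := out = to_equal_length_ranges_py_alt start end_
instance (start : String) (end_ : String) (out : List (String × String)) : Decidable (Spec_to_equal_length_ranges_py start end_ out) := by unfold Spec_to_equal_length_ranges_py; infer_instance

-- ===== CLAIM (what is proved, stated in full; the proofs are below) =====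
def Claim_equal_to_equal_length_ranges_py : Prop := ∀ (start : String) (end_ : String), Dom_to_equal_length_ranges_py start end_ → Spec_to_equal_length_ranges_py start end_ (to_equal_length_ranges_py start end_)

-- ===== LEMMAS AND PROOFS =====

-- Loop invariant for A's fold: from carried `_start = s` at length len s, the fold appends
-- exactly what B's recursion from s produces.
lemma pv_loop (e : String) :
    ∀ (k : Nat) (s : String) (acc : List (String × String)),
      PySem.Str.len s + k = PySem.Str.len e →
    ((PySem.List.pyRange (PySem.Str.len s) (PySem.Str.len e + 1) 1).foldl
      (fun (st : List (String × String) × String) length =>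
        if length = PySem.Str.len e then (st.1 ++ [(st.2, e)], st.2)
        else (st.1 ++ [(st.2, String.ofList (PySem.List.pyRepeat ['9'] length))],
              String.ofList ('1' :: PySem.List.pyRepeat ['0'] length)))
      (acc, s)).1
    = acc ++ to_equal_length_ranges_py_alt s e := by
  intro k
  induction k with
  | zero =>
    intro s acc h
    have hs : PySem.Str.len s = PySem.Str.len e := by omega
    rw [hs, PySem.List.pyRange_one_singleton]
    rw [to_equal_length_ranges_py_alt]
    have hs' : s.length = e.length := by
      simp only [PySem.Str.len_eq] at hs
      exact_mod_cast hs
    simp [hs']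
  | succ k ih =>
    intro s acc h
    have hlt : PySem.Str.len s < PySem.Str.len e + 1 := by omega
    rw [PySem.List.pyRange_one_cons hlt]
    have hne : PySem.Str.len s ≠ PySem.Str.len e := by omega
    simp only [List.foldl_cons, if_neg hne]
    have hrec := ih (String.ofList ('1' :: PySem.List.pyRepeat ['0'] (PySem.Str.len s)))
           (acc ++ [(s, String.ofList (PySem.List.pyRepeat ['9'] (PySem.Str.len s)))])
           (by rw [pv_len_next]; omega)
    rw [pv_len_next] at hrec
    rw [hrec]
    have hge : ¬ PySem.Str.len e ≤ PySem.Str.len s := by omega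
    conv_rhs => rw [to_equal_length_ranges_py_alt]
    rw [dif_neg hge]
    simp

-- ===== VERDICT (by name: the statement is the Claim_ definition above) =====
theorem to_equal_length_ranges_py_spec : Claim_equal_to_equal_length_ranges_py := by
  intro start end_ _
  unfold Spec_to_equal_length_ranges_py to_equal_length_ranges_py
  by_cases heq : PySem.Str.len start = PySem.Str.len end_
  · rw [if_pos heq, to_equal_length_ranges_py_alt, dif_pos (le_of_eq heq.symm), if_pos heq]
  · rw [if_neg heq]
    by_cases hle : PySem.Str.len start ≤ PySem.Str.len end_
    · rw [pv_loop end_ (PySem.Str.len end_ - PySem.Str.len start).toNat start [] (by omega)]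
      simp
    · rw [PySem.List.pyRange_one_eq_nil (by omega)]
      rw [to_equal_length_ranges_py_alt, dif_pos (by omega), if_neg heq]
      simp
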